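-- pv_equiv track=rewrite | github.com/benjaminingreens/liturgical_calendar | create_pdf.py | split_data_by_season
-- ===== SOURCE A (Python) =====
-- def split_data_by_season(data):
--     """
--     Split data into pages based on changes in the 'Season' column.
--     """
--     header_row = data[0]
--     season_index = header_row.index("Season")
--     pages = []
--     current_page = [header_row]
--     current_season = None
--
--     for row in data[1:]:
--         row_season = row[season_index]
--         if row_season != current_season:
--             # Start a new page if the season changes
--             if len(current_page) > 1:  # Avoid adding empty pages
--                 pages.append(current_page)
--             current_page = [header_row]
--             current_season = row_season
--
--         current_page.append(row)
--
--     if len(current_page) > 1:  # Add the last page if it has any rows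
--         pages.append(current_page)
--
--     return pages
-- ===== SOURCE B (Python) =====
-- def split_data_by_season(data):
--     """
--     Split data into pages based on changes in the 'Season' column.
--     """
--     header = data[0]
--     si = header.index("Season")
--     rows = data[1:]
--     pages = []
--     n = len(rows)
--     i = 0
--     while i < n:
--         s = rows[i][si]
--         j = i + 1
--         while j < n and rows[j][si] == s:
--             j += 1
--         pages.append([header] + rows[i:j])
--         i = j
--     return pages
-- ===== Notes on version B (the rewrite author's own statement) =====
-- stated objective: alternative
-- what changed: Replaces A's single-pass state machine (current_page/current_season accumulators with an empty-page guard) by a two-pointer index scan that extracts each maximal run of equal-season rows and emits it as a page directly.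
import Mathlib
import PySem

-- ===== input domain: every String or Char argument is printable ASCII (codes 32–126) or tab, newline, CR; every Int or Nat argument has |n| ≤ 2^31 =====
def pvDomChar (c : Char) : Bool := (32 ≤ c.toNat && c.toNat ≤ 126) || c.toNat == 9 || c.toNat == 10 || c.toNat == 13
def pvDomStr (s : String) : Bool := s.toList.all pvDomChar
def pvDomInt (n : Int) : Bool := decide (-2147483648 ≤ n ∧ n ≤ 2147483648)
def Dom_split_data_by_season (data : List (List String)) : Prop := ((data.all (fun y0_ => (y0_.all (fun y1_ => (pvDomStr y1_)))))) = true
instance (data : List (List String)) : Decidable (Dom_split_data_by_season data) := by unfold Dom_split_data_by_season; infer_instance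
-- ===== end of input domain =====

-- B replaces A's current_season/current_page accumulator state machine with a two-pointer scan
-- that extracts each maximal run of equal-season rows directly (objective: alternative).


-- ===== PORT A =====
-- row[season_index] (in-range under Pre_, so the default is never used there)
def pvRowSeason (row : List String) (si : Int) : String :=
  (PySem.List.pyGet? row si).getD ""

-- one iteration of A's for-loop; state = (pages, current_page, current_season)
def pvStepA (header : List String) (si : Int)
    (st : List (List (List String)) × List (List String) × Option String)
    (row : List String) :
    List (List (List String)) × List (List String) × Option String :=
  let rs := pvRowSeason row si
  let st' :=
    if some rs ≠ st.2.2 then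
      ((if st.2.1.length > 1 then st.1 ++ [st.2.1] else st.1), [header], some rs)
    else st
  (st'.1, st'.2.1 ++ [row], st'.2.2)

def split_data_by_season (data : List (List String)) : List (List (List String)) :=
  let header := (PySem.List.pyGet? data (0 : Int)).getD []
  let si : Int := ((PySem.List.index? header "Season").getD 0 : Nat)
  let st := (PySem.List.slice data (some (1 : Int)) (some (data.length : Int))).foldl
              (pvStepA header si) ([], [header], none)
  if st.2.1.length > 1 then st.1 ++ [st.2.1] else st.1

-- ===== PORT B =====
-- inner while loop: advance j while rows[j][si] == s
def pvRunEnd (rows : List (List String)) (si : Int) (s : String) (j : Nat) : Nat :=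
  if _h : j < rows.length then
    if pvRowSeason ((PySem.List.pyGet? rows (j : Int)).getD []) si = s then
      pvRunEnd rows si s (j + 1)
    else j
  else j
termination_by rows.length - j

theorem pvRunEnd_ge (rows : List (List String)) (si : Int) (s : String) (j : Nat) :
    j ≤ pvRunEnd rows si s j := by
  fun_induction pvRunEnd with
  | case1 j h hk ih => omega
  | case2 j h hk => omega
  | case3 j h => omega

-- outer while loop over the row index i
def pvPagesLoop (rows : List (List String)) (si : Int) (header : List String) (i : Nat) :
    List (List (List String)) :=
  if _h : i < rows.length then
    let s := pvRowSeason ((PySem.List.pyGet? rows (i : Int)).getD []) si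
    let j := pvRunEnd rows si s (i + 1)
    ([header] ++ PySem.List.slice rows (some (i : Int)) (some (j : Int))) ::
      pvPagesLoop rows si header j
  else []
termination_by rows.length - i
decreasing_by
  have := pvRunEnd_ge rows si (pvRowSeason ((PySem.List.pyGet? rows (i : Int)).getD []) si) (i + 1)
  omega

def split_data_by_season_alt (data : List (List String)) : List (List (List String)) :=
  let header := (PySem.List.pyGet? data (0 : Int)).getD []
  let si : Int := ((PySem.List.index? header "Season").getD 0 : Nat)
  let rows := PySem.List.slice data (some (1 : Int)) (some (data.length : Int))
  pvPagesLoop rows si header 0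

-- ===== PRECONDITION & SPEC =====
-- Pre_: exactly where the Python A returns: data nonempty, "Season" present in the header row,
-- and every data row long enough for the season column (otherwise A raises ValueError/IndexError).
def Pre_split_data_by_season (data : List (List String)) : Prop :=
  data ≠ [] ∧ "Season" ∈ data.headI ∧
    ∀ r ∈ data.tail, (PySem.List.index? data.headI "Season").getD 0 < r.length

instance (data : List (List String)) : Decidable (Pre_split_data_by_season data) := by
  unfold Pre_split_data_by_season; infer_instance

def pvWitness_split_data_by_season : List (List String) :=
  [["Date", "Season"], ["1", "Advent"], ["2", "Advent"], ["3", "Lent"]]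

def Spec_split_data_by_season (data : List (List String)) (out : List (List (List String))) : Prop := out = split_data_by_season_alt data
instance (data : List (List String)) (out : List (List (List String))) : Decidable (Spec_split_data_by_season data out) := by unfold Spec_split_data_by_season; infer_instance

-- ===== CLAIM (what is proved, stated in full; the proofs are below) =====
def Claim_equal_split_data_by_season : Prop := ∀ (data : List (List String)), Dom_split_data_by_season data → Pre_split_data_by_season data → Spec_split_data_by_season data (split_data_by_season data)

-- ===== LEMMAS AND PROOFS =====

theorem pvTake_len_takeWhile {α : Type} (p : α → Bool) (l : List α) :
    l.take (l.takeWhile p).length = l.takeWhile p := by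
  induction l with
  | nil => rfl
  | cons x xs ih => by_cases h : p x <;> simp [h, ih]

theorem pvDrop_len_takeWhile {α : Type} (p : α → Bool) (l : List α) :
    l.drop (l.takeWhile p).length = l.dropWhile p := by
  induction l with
  | nil => rfl
  | cons x xs ih => by_cases h : p x <;> simp [h, ih]

-- list-level description of the pages: maximal runs of equal season, each prefixed with the header
def pvPagesL (header : List String) (si : Int) : List (List String) → List (List (List String))
  | [] => []
  | r :: rest =>
      (header :: r :: rest.takeWhile (fun x => pvRowSeason x si == pvRowSeason r si)) ::
        pvPagesL header si (rest.dropWhile (fun x => pvRowSeason x si == pvRowSeason r si))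
termination_by l => l.length
decreasing_by
  have := List.length_dropWhile_le (fun x => pvRowSeason x si == pvRowSeason r si) rest
  simp only [List.length_cons]
  omega

@[simp] theorem pvPagesL_nil (header : List String) (si : Int) :
    pvPagesL header si [] = [] := by
  rw [pvPagesL]

theorem pvPagesL_cons (header : List String) (si : Int) (r : List String)
    (rest : List (List String)) :
    pvPagesL header si (r :: rest) =
      (header :: r :: rest.takeWhile (fun x => pvRowSeason x si == pvRowSeason r si)) ::
        pvPagesL header si (rest.dropWhile (fun x => pvRowSeason x si == pvRowSeason r si)) := by
  rw [pvPagesL]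

theorem pvRunEnd_eq (rows : List (List String)) (si : Int) (s : String) (j : Nat) :
    pvRunEnd rows si s j = j + ((rows.drop j).takeWhile (fun x => pvRowSeason x si == s)).length := by
  fun_induction pvRunEnd with
  | case1 j h hk ih =>
      rw [List.drop_eq_getElem_cons h, List.takeWhile_cons]
      simp only [PySem.List.pyGet?_natCast, List.getElem?_eq_getElem h, Option.getD_some] at hk
      simp [hk, ih]; omega
  | case2 j h hk =>
      rw [List.drop_eq_getElem_cons h, List.takeWhile_cons]
      simp only [PySem.List.pyGet?_natCast, List.getElem?_eq_getElem h, Option.getD_some] at hk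
      simp [hk]
  | case3 j h =>
      rw [List.drop_eq_nil_of_le (by omega)]; simp

theorem pvPagesLoop_eq (rows : List (List String)) (si : Int) (header : List String) (i : Nat) :
    pvPagesLoop rows si header i = pvPagesL header si (rows.drop i) := by
  fun_induction pvPagesLoop with
  | case1 i h s j ih =>
      rw [List.drop_eq_getElem_cons h, pvPagesL_cons]
      have hs : s = pvRowSeason rows[i] si := by
        simp [s, PySem.List.pyGet?_natCast, List.getElem?_eq_getElem h]
      have hj : j = i + 1 + ((rows.drop (i+1)).takeWhile (fun x => pvRowSeason x si == s)).length :=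
        pvRunEnd_eq rows si s (i+1)
      rw [List.cons_eq_cons]
      have hge := pvRunEnd_ge rows si s (i + 1)
      constructor
      · rw [PySem.List.slice_natCast, List.drop_eq_getElem_cons h,
           show j - i = (j - (i+1)) + 1 by omega, List.take_succ_cons]
        simp only [List.cons_append, List.nil_append, ← hs]
        rw [show j - (i+1) = ((rows.drop (i+1)).takeWhile
              (fun x => pvRowSeason x si == s)).length by omega]
        rw [pvTake_len_takeWhile]
      · rw [ih, hj, ← List.drop_drop, pvDrop_len_takeWhile, hs]
  | case2 i h =>
      rw [List.drop_eq_nil_of_le (by omega), pvPagesL_nil]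

-- A's loop from a state inside an open page: pending page gets the run, then pvPagesL takes over
theorem pvFoldA_eq (header : List String) (si : Int) (rows : List (List String)) :
    ∀ (P : List (List (List String))) (acc : List (List String)) (s : String), acc ≠ [] →
      (if (rows.foldl (pvStepA header si) (P, header :: acc, some s)).2.1.length > 1 then
         (rows.foldl (pvStepA header si) (P, header :: acc, some s)).1
           ++ [(rows.foldl (pvStepA header si) (P, header :: acc, some s)).2.1]
       else (rows.foldl (pvStepA header si) (P, header :: acc, some s)).1)
      = P ++ (header :: acc ++ rows.takeWhile (fun x => pvRowSeason x si == s)) ::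
             pvPagesL header si (rows.dropWhile (fun x => pvRowSeason x si == s)) := by
  induction rows with
  | nil =>
      intro P acc s hacc
      simp [List.length_pos_iff.mpr hacc]
  | cons r rest ih =>
      intro P acc s hacc
      simp only [List.foldl_cons, List.takeWhile_cons, List.dropWhile_cons]
      by_cases hk : pvRowSeason r si = s
      · have hstep : pvStepA header si (P, header :: acc, some s) r
            = (P, header :: (acc ++ [r]), some s) := by
          simp [pvStepA, hk]
        rw [hstep, ih P (acc ++ [r]) s (by simp)]
        simp [hk]
      · have hstep : pvStepA header si (P, header :: acc, some s) r
            = (P ++ [header :: acc], header :: [r], some (pvRowSeason r si)) := by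
          simp [pvStepA, hk, List.length_pos_iff.mpr hacc]
        rw [hstep, ih (P ++ [header :: acc]) [r] (pvRowSeason r si) (by simp)]
        simp [hk, pvPagesL_cons]

theorem pvSlice_one_len {α : Type} (xs : List α) :
    PySem.List.slice xs (some (1 : Int)) (some (xs.length : Int)) = xs.tail := by
  have h := PySem.List.slice_natCast (xs := xs) (a := 1) (b := xs.length)
  simp only [Nat.cast_one] at h
  rw [h, List.take_of_length_le (by simp), List.drop_one]

theorem split_eq (data : List (List String)) :
    split_data_by_season data = split_data_by_season_alt data := by
  simp only [split_data_by_season, split_data_by_season_alt]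
  rw [pvSlice_one_len, pvPagesLoop_eq, List.drop_zero]
  cases data with
  | nil => simp
  | cons header t =>
      simp only [PySem.List.pyGet?_zero_cons, Option.getD_some, List.tail_cons]
      cases t with
      | nil => simp
      | cons r rest =>
          rw [List.foldl_cons]
          have hstep : pvStepA header (((PySem.List.index? header "Season").getD 0 : Nat))
              ([], [header], none) r
              = ([], header :: [r],
                 some (pvRowSeason r (((PySem.List.index? header "Season").getD 0 : Nat)))) := by
            simp [pvStepA]
          rw [hstep,
            pvFoldA_eq header (((PySem.List.index? header "Season").getD 0 : Nat)) rest [] [r]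
              (pvRowSeason r (((PySem.List.index? header "Season").getD 0 : Nat))) (by simp),
            pvPagesL_cons]
          simp

-- ===== VERDICT (by name: the statement is the Claim_ definition above) =====
theorem split_data_by_season_spec : Claim_equal_split_data_by_season := by
  intro data _ _
  unfold Spec_split_data_by_season
  exact split_eq data
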